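-- pv_equiv track=rewrite | github.com/gabinsane/ald-vae | ald_vae/utils.py | get_last_n_vals
-- ===== SOURCE A (Python) =====
-- def get_last_n_vals(l, positive=True):
--     if positive:
--         if all([i>0 for i in l]):
--             return len(l)
--         elif all([i<0 for i in l]):
--             return False
--     if not positive:
--         if all([i<0 for i in l]):
--             return len(l)
--         elif all([i>0 for i in l]):
--             return False
--     if positive:
--         for i, v in enumerate(reversed(l)):
--             if v <= 0:
--                 return False if i == 0 else i
--     else:
--         for i, v in enumerate(reversed(l)):
--             if v >= 0:
--                 return False if i == 0 else i
-- ===== SOURCE B (Python) =====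
-- def get_last_n_vals(l, positive=True):
--     # forward pass: record the index of the last element that fails the sign
--     # predicate; the trailing run length is then len(l) - last_bad - 1.
--     last_bad = -1
--     for i, v in enumerate(l):
--         if not (v > 0 if positive else v < 0):
--             last_bad = i
--     if last_bad == -1:
--         return len(l)
--     run = len(l) - last_bad - 1
--     return run if run > 0 else False
-- ===== Notes on version B (the rewrite author's own statement) =====
-- stated objective: alternative
-- what changed: Replaces A's two full all()-scans plus a per-sign enumerate(reversed(l)) break-loop with a single forward pass that records the index of the last element failing the sign predicate and derives the trailing-run length arithmetically as len(l) - last_bad - 1; Pre_ excludes inputs whose last element fails the sign predicate, on which A (and B alike) return the bool False rather than an int.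
-- outside the precondition, e.g. on get_last_n_vals([0], False): A returns False, B returns False; on get_last_n_vals([1, -1], True): A returns False, B returns False
import Mathlib
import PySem

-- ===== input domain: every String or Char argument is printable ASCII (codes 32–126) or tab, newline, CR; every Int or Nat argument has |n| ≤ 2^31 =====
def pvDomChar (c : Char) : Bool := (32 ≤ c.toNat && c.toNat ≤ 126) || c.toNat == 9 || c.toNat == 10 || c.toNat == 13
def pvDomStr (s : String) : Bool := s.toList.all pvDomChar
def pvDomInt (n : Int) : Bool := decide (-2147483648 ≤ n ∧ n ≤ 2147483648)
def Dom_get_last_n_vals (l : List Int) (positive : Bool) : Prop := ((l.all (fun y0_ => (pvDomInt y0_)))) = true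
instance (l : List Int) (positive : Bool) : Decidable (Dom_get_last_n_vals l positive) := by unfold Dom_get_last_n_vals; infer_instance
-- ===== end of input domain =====

-- B replaces A's two all()-scans plus a per-sign reverse loop by one forward pass that
-- records the index of the last failing element, then computes the trailing run length
-- by arithmetic (objective: alternative). Python's False return is Int 0 here.

-- ===== PORT A =====
-- the 'for i, v in enumerate(reversed(l))' loop of A; [] = loop exhausted (Python falls
-- through returning None, unreachable because the all()-branches returned earlier)
def pvLoopA : List Int → Int → Bool → Int
  | [], _, _ => 0
  | v :: rest, i, positive =>
    if positive then
      if v ≤ 0 then (if i = 0 then 0 else i) else pvLoopA rest (i + 1) positive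
    else
      if v ≥ 0 then (if i = 0 then 0 else i) else pvLoopA rest (i + 1) positive

def get_last_n_vals (l : List Int) (positive : Bool) : Int :=
  if positive && l.all (fun i => decide (i > 0)) then (l.length : Int)
  else if positive && l.all (fun i => decide (i < 0)) then 0
  else if !positive && l.all (fun i => decide (i < 0)) then (l.length : Int)
  else if !positive && l.all (fun i => decide (i > 0)) then 0
  else pvLoopA l.reverse 0 positive

-- ===== PORT B =====
-- B's forward 'for i, v in enumerate(l)' pass updating last_bad
def pvLastBad : List Int → Int → Int → Bool → Int
  | [], _, lb, _ => lb
  | v :: rest, i, lb, positive =>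
    pvLastBad rest (i + 1)
      (if (if positive then v > 0 else v < 0) then lb else i) positive

def get_last_n_vals_alt (l : List Int) (positive : Bool) : Int :=
  let lb := pvLastBad l 0 (-1) positive
  if lb = -1 then (l.length : Int)
  else
    let run := (l.length : Int) - lb - 1
    if run > 0 then run else 0

-- ===== PRECONDITION & SPEC =====
-- Pre_ excludes exactly the inputs on which the Python A returns the bool False instead of
-- an int: those whose last element fails the sign predicate (v>0 if positive else v<0).
def Pre_get_last_n_vals (l : List Int) (positive : Bool) : Prop :=
  (l.getLast?.all (fun v => if positive then decide (v > 0) else decide (v < 0))) = true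
instance (l : List Int) (positive : Bool) : Decidable (Pre_get_last_n_vals l positive) := by unfold Pre_get_last_n_vals; infer_instance
def pvWitness_get_last_n_vals : List Int × Bool := ([1, -2, 3], true)

def Spec_get_last_n_vals (l : List Int) (positive : Bool) (out : Int) : Prop := out = get_last_n_vals_alt l positive
instance (l : List Int) (positive : Bool) (out : Int) : Decidable (Spec_get_last_n_vals l positive out) := by unfold Spec_get_last_n_vals; infer_instance

-- ===== CLAIM (what is proved, stated in full; the proofs are below) =====
def Claim_equal_get_last_n_vals : Prop := ∀ (l : List Int) (positive : Bool), Dom_get_last_n_vals l positive → Pre_get_last_n_vals l positive → Spec_get_last_n_vals l positive (get_last_n_vals l positive)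

-- ===== LEMMAS AND PROOFS =====

-- the sign predicate both loops test
def pvSat (positive : Bool) (v : Int) : Bool := if positive then decide (v > 0) else decide (v < 0)

-- length of the leading run of its argument that satisfies the predicate; applied to
-- l.reverse it measures the trailing run of l
def pvCount : List Int → Bool → Int
  | [], _ => 0
  | v :: rest, positive =>
    if pvSat positive v then 1 + pvCount rest positive else 0

lemma sat_true (v : Int) : pvSat true v = true ↔ v > 0 := by simp [pvSat]
lemma sat_false (v : Int) : pvSat false v = true ↔ v < 0 := by simp [pvSat]

lemma pvLoopA_cons (v : Int) (rest : List Int) (i : Int) (p : Bool) :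
    pvLoopA (v :: rest) i p =
      if pvSat p v then pvLoopA rest (i + 1) p else (if i = 0 then 0 else i) := by
  cases p <;> simp only [pvLoopA, pvSat] <;> split_ifs <;> simp_all <;> omega

lemma pvLastBad_cons (v : Int) (rest : List Int) (i lb : Int) (p : Bool) :
    pvLastBad (v :: rest) i lb p =
      pvLastBad rest (i + 1) (if pvSat p v then lb else i) p := by
  cases p <;> simp [pvLastBad, pvSat]

lemma pvCount_le_len (rev : List Int) (p : Bool) : pvCount rev p ≤ (rev.length : Int) := by
  induction rev with
  | nil => simp [pvCount]
  | cons v rest ih => simp only [pvCount, List.length_cons]; split <;> push_cast <;> omega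

lemma pvCount_nonneg (rev : List Int) (p : Bool) : 0 ≤ pvCount rev p := by
  induction rev with
  | nil => simp [pvCount]
  | cons v rest ih => simp only [pvCount]; split <;> omega

lemma pvCount_all (rev : List Int) (p : Bool) (h : ∀ v ∈ rev, pvSat p v = true) :
    pvCount rev p = (rev.length : Int) := by
  induction rev with
  | nil => simp [pvCount]
  | cons v rest ih =>
    simp only [pvCount, if_pos (h v (by simp)), ih (fun w hw => h w (by simp [hw])),
      List.length_cons]
    push_cast; ring

lemma pvCount_eq_length (rev : List Int) (p : Bool)
    (h : pvCount rev p = (rev.length : Int)) : ∀ v ∈ rev, pvSat p v = true := by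
  induction rev with
  | nil => simp
  | cons v rest ih =>
    simp only [pvCount] at h
    have hle := pvCount_le_len rest p
    by_cases hv : pvSat p v = true
    · rw [if_pos hv] at h
      intro w hw
      rcases List.mem_cons.mp hw with rfl | hw'
      · exact hv
      · exact ih (by simp at h; omega) w hw'
    · rw [if_neg hv] at h
      simp at h
      have := Int.natCast_nonneg rest.length
      omega

lemma pvCount_none (rev : List Int) (p : Bool) (h : ∀ v ∈ rev, ¬ pvSat p v = true) :
    pvCount rev p = 0 := by
  cases rev with
  | nil => simp [pvCount]
  | cons v rest => simp only [pvCount]; rw [if_neg (h v (by simp))]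

lemma pvCount_append (xs : List Int) (v : Int) (p : Bool) :
    pvCount (xs ++ [v]) p =
      if pvCount xs p = (xs.length : Int)
      then pvCount xs p + (if pvSat p v then 1 else 0)
      else pvCount xs p := by
  induction xs with
  | nil =>
    simp only [List.nil_append, pvCount, List.length_nil]
    split_ifs <;> simp_all
  | cons x xs ih =>
    simp only [List.cons_append, pvCount, List.length_cons]
    have hle := pvCount_le_len xs p
    by_cases hx : pvSat p x = true
    · rw [if_pos hx, if_pos hx, ih]
      split_ifs <;> push_cast at * <;> omega
    · rw [if_neg hx, if_neg hx]
      have hlen := Int.natCast_nonneg xs.length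
      split_ifs with h <;> first | rfl | (push_cast at h; omega)

lemma pvLoopA_eq (rev : List Int) (p : Bool) (hex : ∃ v ∈ rev, ¬ pvSat p v = true) :
    ∀ i : Int, pvLoopA rev i p =
      if i + pvCount rev p = 0 then 0 else i + pvCount rev p := by
  induction rev with
  | nil => rcases hex with ⟨v, hv, _⟩; simp at hv
  | cons v rest ih =>
    intro i
    rw [pvLoopA_cons]
    simp only [pvCount]
    by_cases hv : pvSat p v = true
    · rcases hex with ⟨w, hw, hns⟩
      rcases List.mem_cons.mp hw with rfl | hw'
      · exact absurd hv hns
      rw [if_pos hv, if_pos hv, ih ⟨w, hw', hns⟩ (i + 1)]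
      split_ifs <;> omega
    · rw [if_neg hv, if_neg hv]
      split_ifs <;> omega

-- characterisation of B's forward pass via the trailing-run count
lemma pvLastBad_eq (l : List Int) (p : Bool) :
    ∀ i lb : Int, pvLastBad l i lb p =
      if ∀ v ∈ l, pvSat p v = true then lb
      else i + (l.length : Int) - 1 - pvCount l.reverse p := by
  induction l with
  | nil => intro i lb; simp [pvLastBad]
  | cons v rest ih =>
    intro i lb
    rw [pvLastBad_cons, ih]
    have happ : pvCount (v :: rest).reverse p =
        if pvCount rest.reverse p = (rest.length : Int)
        then pvCount rest.reverse p + (if pvSat p v then 1 else 0)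
        else pvCount rest.reverse p := by
      rw [List.reverse_cons, pvCount_append]; simp
    by_cases hall : ∀ w ∈ rest, pvSat p w = true
    · have hc : pvCount rest.reverse p = (rest.length : Int) := by
        rw [pvCount_all rest.reverse p (fun w hw => hall w (List.mem_reverse.mp hw))]; simp
      rw [if_pos hall] at *
      by_cases hv : pvSat p v = true
      · rw [if_pos hv, if_pos (by intro w hw; rcases List.mem_cons.mp hw with rfl | hw'
                                  exacts [hv, hall w hw'])]
      · rw [if_neg hv, if_neg (by intro h; exact hv (h v (by simp)))]
        rw [happ, if_pos hc, if_neg hv, hc]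
        simp only [List.length_cons]; push_cast; ring
    · have hcne : pvCount rest.reverse p ≠ (rest.length : Int) := by
        intro hc
        exact hall (fun w hw => pvCount_eq_length rest.reverse p (by rw [hc]; simp) w
          (List.mem_reverse.mpr hw))
      have hfull : ¬ ∀ w ∈ v :: rest, pvSat p w = true := by
        intro h; exact hall (fun w hw => h w (by simp [hw]))
      rw [if_neg hall, if_neg hfull, happ, if_neg hcne]
      simp only [List.length_cons]; push_cast; ring

-- A = B on every input (the ports both render Python's False as Int 0)
lemma ports_agree : ∀ (l : List Int) (positive : Bool),
    get_last_n_vals l positive = get_last_n_vals_alt l positive := by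
  intro l p
  unfold get_last_n_vals get_last_n_vals_alt
  rw [pvLastBad_eq]
  have hcnn := pvCount_nonneg l.reverse p
  have hcle : pvCount l.reverse p ≤ (l.length : Int) := by
    have := pvCount_le_len l.reverse p; simpa using this
  set c := pvCount l.reverse p with hc
  by_cases hall : ∀ v ∈ l, pvSat p v = true
  · have hceq : c = (l.length : Int) := by
      rw [hc, pvCount_all l.reverse p (fun w hw => hall w (List.mem_reverse.mp hw))]; simp
    rw [if_pos hall]
    cases p with
    | true =>
      have b1 : l.all (fun i => decide (i > 0)) = true := by
        simp only [List.all_eq_true, decide_eq_true_iff]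
        exact fun v hv => (sat_true v).mp (hall v hv)
      simp [b1]
    | false =>
      have b1 : l.all (fun i => decide (i < 0)) = true := by
        simp only [List.all_eq_true, decide_eq_true_iff]
        exact fun v hv => (sat_false v).mp (hall v hv)
      simp [b1]
  · have hne : l ≠ [] := by rintro rfl; exact hall (by simp)
    have hlpos : 0 < l.length := List.length_pos_iff.mpr hne
    have hcne : c ≠ (l.length : Int) := by
      intro hceq
      exact hall (fun w hw => pvCount_eq_length l.reverse p (by rw [← hc, hceq]; simp) w
        (List.mem_reverse.mpr hw))
    have hlbne : ¬ (0 + (l.length : Int) - 1 - c = -1) := by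
      intro h; apply hcne; omega
    rw [if_neg hall, if_neg hlbne]
    have hrun : (l.length : Int) - (0 + (l.length : Int) - 1 - c) - 1 = c := by ring
    rw [hrun]
    have hloop : pvLoopA l.reverse 0 p = if 0 + c = 0 then 0 else 0 + c := by
      apply pvLoopA_eq
      push_neg at hall
      rcases hall with ⟨v, hv, hns⟩
      exact ⟨v, List.mem_reverse.mpr hv, by simp [hns]⟩
    cases p with
    | true =>
      have b1 : l.all (fun i => decide (i > 0)) = false := by
        simp only [List.all_eq_false]
        push_neg at hall
        rcases hall with ⟨v, hv, hns⟩
        exact ⟨v, hv, by simpa using fun h => hns ((sat_true v).mpr h)⟩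
      by_cases h2 : ∀ v ∈ l, pvSat false v = true
      · have b2 : l.all (fun i => decide (i < 0)) = true := by
          simp only [List.all_eq_true, decide_eq_true_iff]
          exact fun v hv => (sat_false v).mp (h2 v hv)
        have hcz : c = 0 := by
          rw [hc]
          apply pvCount_none
          intro v hv
          have := (sat_false v).mp (h2 v (List.mem_reverse.mp hv))
          rw [sat_true]; omega
        simp only [Bool.true_and, b1, Bool.false_eq_true, if_false, b2, if_true,
          Bool.not_true, Bool.false_and]
        rw [hcz]; simp
      · have b2 : l.all (fun i => decide (i < 0)) = false := by
          simp only [List.all_eq_false]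
          push_neg at h2
          rcases h2 with ⟨v, hv, hns⟩
          exact ⟨v, hv, by simpa using fun h => hns ((sat_false v).mpr h)⟩
        simp only [Bool.true_and, b1, b2, Bool.false_eq_true, if_false,
          Bool.not_true, Bool.false_and]
        rw [hloop]
        split_ifs <;> omega
    | false =>
      have b1 : l.all (fun i => decide (i < 0)) = false := by
        simp only [List.all_eq_false]
        push_neg at hall
        rcases hall with ⟨v, hv, hns⟩
        exact ⟨v, hv, by simpa using fun h => hns ((sat_false v).mpr h)⟩
      by_cases h2 : ∀ v ∈ l, pvSat true v = true
      · have b2 : l.all (fun i => decide (i > 0)) = true := by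
          simp only [List.all_eq_true, decide_eq_true_iff]
          exact fun v hv => (sat_true v).mp (h2 v hv)
        have hcz : c = 0 := by
          rw [hc]
          apply pvCount_none
          intro v hv
          have := (sat_true v).mp (h2 v (List.mem_reverse.mp hv))
          rw [sat_false]; omega
        simp only [Bool.false_and, b1, Bool.false_eq_true, if_false, b2, if_true,
          Bool.not_false, Bool.true_and]
        rw [hcz]; simp
      · have b2 : l.all (fun i => decide (i > 0)) = false := by
          simp only [List.all_eq_false]
          push_neg at h2
          rcases h2 with ⟨v, hv, hns⟩
          exact ⟨v, hv, by simpa using fun h => hns ((sat_true v).mpr h)⟩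
        simp only [Bool.false_and, b1, b2, Bool.false_eq_true, if_false,
          Bool.not_false, Bool.true_and]
        rw [hloop]
        split_ifs <;> omega

-- ===== VERDICT (by name: the statement is the Claim_ definition above) =====
theorem get_last_n_vals_spec : Claim_equal_get_last_n_vals := by
  intro l positive _ _
  exact ports_agree l positive
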